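-- pv_equiv track=rewrite | github.com/HariPNarayanan/league-logger | src/cs_analysis.py | cs_deltas
-- ===== SOURCE A (Python) =====
-- def cs_deltas(cumulative: list[int | None]) -> list[int | None]:
--     """
--     Converts a cumulative CS list (from extract_cs_timeline) into per-minute
--     deltas, i.e. CS gained in each individual minute.
--
--     Kept separate so callers can choose cumulative vs delta representation.
--     """
--     deltas: list[int | None] = []
--     prev = 0
--     for value in cumulative:
--         if value is None:
--             deltas.append(None)
--         else:
--             deltas.append(value - prev)
--             prev = value
--     return deltas
-- ===== SOURCE B (Python) =====
-- def cs_deltas(cumulative):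
--     """Gather non-None values, take adjacent differences (0 prepended), scatter back."""
--     vals = [v for v in cumulative if v is not None]
--     diffs = [b - a for a, b in zip([0] + vals, vals)]
--     it = iter(diffs)
--     return [None if v is None else next(it) for v in cumulative]
-- ===== Notes on version B (the rewrite author's own statement) =====
-- stated objective: alternative
-- what changed: Replaces the single stateful prev-tracking loop by a gather/adjacent-difference/scatter pipeline: filter the non-None values, zip the list against itself shifted by one (0 prepended) to get the deltas, then redistribute them into the None positions.
import Mathlib
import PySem

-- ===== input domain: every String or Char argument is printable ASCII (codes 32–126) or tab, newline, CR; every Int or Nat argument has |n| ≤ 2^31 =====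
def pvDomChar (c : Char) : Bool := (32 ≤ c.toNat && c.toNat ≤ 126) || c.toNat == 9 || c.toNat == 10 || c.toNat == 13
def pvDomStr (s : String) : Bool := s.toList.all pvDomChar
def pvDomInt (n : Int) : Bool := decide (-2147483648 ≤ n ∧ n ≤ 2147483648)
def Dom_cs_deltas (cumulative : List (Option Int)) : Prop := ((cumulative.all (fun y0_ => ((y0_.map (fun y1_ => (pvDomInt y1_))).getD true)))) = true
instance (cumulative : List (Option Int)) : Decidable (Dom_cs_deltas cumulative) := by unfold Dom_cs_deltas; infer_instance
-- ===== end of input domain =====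

-- B replaces A's stateful prev-tracking loop by a gather / adjacent-difference / scatter pipeline (alternative decomposition, same cost).

-- ===== PORT A =====
-- A's loop: walk the list with state `prev`, emitting each delta and updating prev only on non-None entries.
def csDeltasLoop (prev : Int) : List (Option Int) → List (Option Int)
  | [] => []
  | none :: rest => none :: csDeltasLoop prev rest
  | some v :: rest => some (v - prev) :: csDeltasLoop v rest

def cs_deltas (cumulative : List (Option Int)) : List (Option Int) :=
  csDeltasLoop 0 cumulative

-- ===== PORT B =====
-- Scatter: consume the delta stream at each non-None slot of the template.
def csScatter : List (Option Int) → List Int → List (Option Int)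
  | [], _ => []
  | none :: rest, ds => none :: csScatter rest ds
  | some _ :: _, [] => []  -- never reached: the stream has one delta per non-None slot
  | some _ :: rest, d :: ds => some d :: csScatter rest ds

def cs_deltas_alt (cumulative : List (Option Int)) : List (Option Int) :=
  let vals := cumulative.filterMap id
  let diffs := List.zipWith (fun a b => b - a) (0 :: vals) vals
  csScatter cumulative diffs

-- ===== PRECONDITION & SPEC =====
def Spec_cs_deltas (cumulative : List (Option Int)) (out : List (Option Int)) : Prop := out = cs_deltas_alt cumulative
instance (cumulative : List (Option Int)) (out : List (Option Int)) : Decidable (Spec_cs_deltas cumulative out) := by unfold Spec_cs_deltas; infer_instance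

-- ===== CLAIM (what is proved, stated in full; the proofs are below) =====
def Claim_equal_cs_deltas : Prop := ∀ (cumulative : List (Option Int)), Dom_cs_deltas cumulative → Spec_cs_deltas cumulative (cs_deltas cumulative)

-- ===== LEMMAS AND PROOFS =====
theorem csDeltasLoop_eq (cumulative : List (Option Int)) :
    ∀ p : Int, csDeltasLoop p cumulative =
      csScatter cumulative
        (List.zipWith (fun a b => b - a) (p :: cumulative.filterMap id) (cumulative.filterMap id)) := by
  induction cumulative with
  | nil => intro p; rfl
  | cons h t ih =>
    intro p
    cases h with
    | none => simp [csDeltasLoop, csScatter, ih]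
    | some v => simp [csDeltasLoop, csScatter, List.filterMap, ih v]

-- ===== VERDICT (by name: the statement is the Claim_ definition above) =====
theorem cs_deltas_spec : Claim_equal_cs_deltas := by
  intro cumulative _
  unfold Spec_cs_deltas cs_deltas cs_deltas_alt
  exact csDeltasLoop_eq cumulative 0
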